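-- pv_equiv track=rewrite | github.com/andriellcastroneves/packaging_system | app/services.py | encontrar_melhor_caixa
-- ===== SOURCE A (Python) =====
-- def gerar_rotacoes(item):
--     a, b, c = item
--     return [
--         (a, b, c),
--         (a, c, b),
--         (b, a, c),
--         (b, c, a),
--         (c, a, b),
--         (c, b, a),
--     ]
--
-- def calcular_max_itens(item, caixa):
--     caixa_altura = caixa[2]
--     caixa_largura = caixa[3]
--     caixa_comprimento = caixa[4]
--
--     max_itens = 0
--     melhor_rotacao = None
--
--     for rot in gerar_rotacoes(item):
--         a, l, c = rot
--
--         if a <= 0 or l <= 0 or c <= 0: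
--             continue
--
--         qtd = int(caixa_altura // a) * int(caixa_largura // l) * int(caixa_comprimento // c)
--
--         if qtd > max_itens:
--             max_itens = qtd
--             melhor_rotacao = rot
--
--     return max_itens, melhor_rotacao
--
-- def encontrar_melhor_caixa(item_dim, quantidade, caixas):
--     melhor_caixa = None
--     melhor_capacidade = 0
--     melhor_rotacao = None
--     menor_volume = None
--
--     for caixa in caixas:
--         capacidade, rotacao = calcular_max_itens(item_dim, caixa)
--
--         if capacidade >= quantidade:
--             volume_caixa = caixa[2] * caixa[3] * caixa[4]
--
--             if menor_volume is None or volume_caixa < menor_volume: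
--                 menor_volume = volume_caixa
--                 melhor_caixa = caixa
--                 melhor_capacidade = capacidade
--                 melhor_rotacao = rotacao
--
--     return melhor_caixa, melhor_capacidade, melhor_rotacao
-- ===== SOURCE B (Python) =====
-- def gerar_rotacoes(item):
--     a, b, c = item
--     return [
--         (a, b, c),
--         (a, c, b),
--         (b, a, c),
--         (b, c, a),
--         (c, a, b),
--         (c, b, a),
--     ]
--
-- def calcular_max_itens(item, caixa):
--     ah, al, ac = caixa[2], caixa[3], caixa[4]
--     validas = [((ah // a) * (al // l) * (ac // c), (a, l, c))
--                for (a, l, c) in gerar_rotacoes(item)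
--                if a > 0 and l > 0 and c > 0]
--     qtd, rot = max(validas, key=lambda t: t[0], default=(0, None))
--     return (qtd, rot) if qtd > 0 else (0, None)
--
-- def encontrar_melhor_caixa(item_dim, quantidade, caixas):
--     # Stable sort by volume, then the FIRST qualifying box is the answer:
--     # stability preserves A's first-box tie-breaking at equal volume, and
--     # capacities are only computed until the first hit.
--     for caixa in sorted(caixas, key=lambda c: c[2] * c[3] * c[4]):
--         capacidade, rotacao = calcular_max_itens(item_dim, caixa)
--         if capacidade >= quantidade:
--             return caixa, capacidade, rotacao
--     return None, 0, None
-- ===== Notes on version B (the rewrite author's own statement) =====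
-- stated objective: alternative
-- what changed: A's single pass maintaining four running best-so-far accumulators is replaced by a stable sort of the boxes by volume followed by an early-exit scan returning the first qualifying box (capacities computed lazily, only up to the first hit); the rotation choice becomes a comprehension over valid rotations plus max(..., default).
import Mathlib
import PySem

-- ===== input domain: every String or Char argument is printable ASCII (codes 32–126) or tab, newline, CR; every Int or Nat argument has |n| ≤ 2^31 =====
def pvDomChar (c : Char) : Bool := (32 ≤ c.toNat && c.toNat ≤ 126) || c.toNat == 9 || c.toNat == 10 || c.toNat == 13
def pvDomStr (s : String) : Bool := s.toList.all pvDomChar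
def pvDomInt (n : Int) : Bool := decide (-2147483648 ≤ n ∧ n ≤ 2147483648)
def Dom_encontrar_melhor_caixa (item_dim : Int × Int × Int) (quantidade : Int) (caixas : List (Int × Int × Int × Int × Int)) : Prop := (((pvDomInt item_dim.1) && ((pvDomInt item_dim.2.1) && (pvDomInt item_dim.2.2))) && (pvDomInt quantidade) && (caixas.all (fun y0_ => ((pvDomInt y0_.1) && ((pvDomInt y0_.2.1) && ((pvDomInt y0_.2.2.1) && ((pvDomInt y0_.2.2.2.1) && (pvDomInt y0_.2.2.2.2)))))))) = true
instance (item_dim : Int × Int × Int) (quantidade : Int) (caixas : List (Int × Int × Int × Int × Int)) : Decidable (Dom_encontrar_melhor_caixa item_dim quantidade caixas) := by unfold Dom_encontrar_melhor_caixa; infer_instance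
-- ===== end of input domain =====

-- B stable-sorts the boxes by volume and returns the first qualifying one (early exit, capacities
-- computed lazily), instead of A's single accumulator pass; sort-then-scan, an alternative algorithm.


-- ===== PORT A =====
def gerar_rotacoes (item : Int × Int × Int) : List (Int × Int × Int) :=
  let a := item.1; let b := item.2.1; let c := item.2.2
  [(a, b, c), (a, c, b), (b, a, c), (b, c, a), (c, a, b), (c, b, a)]

def calcular_max_itens (item : Int × Int × Int) (caixa : Int × Int × Int × Int × Int) :
    Int × Option (Int × Int × Int) :=
  let ch := caixa.2.2.1
  let cl := caixa.2.2.2.1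
  let cc := caixa.2.2.2.2
  (gerar_rotacoes item).foldl (fun s rot =>
    if rot.1 ≤ 0 ∨ rot.2.1 ≤ 0 ∨ rot.2.2 ≤ 0 then s
    else
      let qtd := PySem.Int.floordiv ch rot.1 * PySem.Int.floordiv cl rot.2.1 *
                 PySem.Int.floordiv cc rot.2.2
      if s.1 < qtd then (qtd, some rot) else s) (0, none)

def encontrar_melhor_caixa (item_dim : Int × Int × Int) (quantidade : Int) (caixas : List (Int × Int × Int × Int × Int)) : (Option (Int × Int × Int × Int × Int)) × Int × (Option (Int × Int × Int)) :=
  let s := caixas.foldl (fun s caixa =>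
      let r := calcular_max_itens item_dim caixa
      if quantidade ≤ r.1 then
        let vol := caixa.2.2.1 * caixa.2.2.2.1 * caixa.2.2.2.2
        match s.2.2.2 with
        | none => (some caixa, r.1, r.2, some vol)
        | some mv => if vol < mv then (some caixa, r.1, r.2, some vol) else s
      else s)
    ((none, 0, none, none) :
      Option (Int × Int × Int × Int × Int) × Int × Option (Int × Int × Int) × Option Int)
  (s.1, s.2.1, s.2.2.1)

-- ===== PORT B =====
-- Source B's rotation values are tuples-or-None: ported as Option, so 'validas' carries 'some rot'.
def calcular_max_itens_alt (item : Int × Int × Int) (caixa : Int × Int × Int × Int × Int) :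
    Int × Option (Int × Int × Int) :=
  let ch := caixa.2.2.1
  let cl := caixa.2.2.2.1
  let cc := caixa.2.2.2.2
  let validas : List (Int × Option (Int × Int × Int)) :=
    ((gerar_rotacoes item).filter (fun r => 0 < r.1 && 0 < r.2.1 && 0 < r.2.2)).map
      (fun r => (PySem.Int.floordiv ch r.1 * PySem.Int.floordiv cl r.2.1 *
                 PySem.Int.floordiv cc r.2.2, some r))
  let m := PySem.List.maxD validas (fun t => t.1) (0, none)
  if 0 < m.1 then m else (0, none)

-- the 'for … return / fall through' loop of Source B over the sorted list
def emc_loop (item : Int × Int × Int) (quantidade : Int) :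
    List (Int × Int × Int × Int × Int) →
      (Option (Int × Int × Int × Int × Int)) × Int × (Option (Int × Int × Int))
  | [] => (none, 0, none)
  | cx :: t =>
      let r := calcular_max_itens_alt item cx
      if quantidade ≤ r.1 then (some cx, r.1, r.2) else emc_loop item quantidade t

def encontrar_melhor_caixa_alt (item_dim : Int × Int × Int) (quantidade : Int) (caixas : List (Int × Int × Int × Int × Int)) : (Option (Int × Int × Int × Int × Int)) × Int × (Option (Int × Int × Int)) :=
  emc_loop item_dim quantidade
    (PySem.List.sorted caixas (fun c => c.2.2.1 * c.2.2.2.1 * c.2.2.2.2) false)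

-- ===== PRECONDITION & SPEC =====
def Spec_encontrar_melhor_caixa (item_dim : Int × Int × Int) (quantidade : Int) (caixas : List (Int × Int × Int × Int × Int)) (out : (Option (Int × Int × Int × Int × Int)) × Int × (Option (Int × Int × Int))) : Prop := out = encontrar_melhor_caixa_alt item_dim quantidade caixas
instance (item_dim : Int × Int × Int) (quantidade : Int) (caixas : List (Int × Int × Int × Int × Int)) (out : (Option (Int × Int × Int × Int × Int)) × Int × (Option (Int × Int × Int))) : Decidable (Spec_encontrar_melhor_caixa item_dim quantidade caixas out) := by unfold Spec_encontrar_melhor_caixa; infer_instance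

-- ===== CLAIM (what is proved, stated in full; the proofs are below) =====
def Claim_equal_encontrar_melhor_caixa : Prop := ∀ (item_dim : Int × Int × Int) (quantidade : Int) (caixas : List (Int × Int × Int × Int × Int)), Dom_encontrar_melhor_caixa item_dim quantidade caixas → Spec_encontrar_melhor_caixa item_dim quantidade caixas (encontrar_melhor_caixa item_dim quantidade caixas)

-- ===== LEMMAS AND PROOFS =====

/-- Reading a running-max accumulator (initial value `(m0, b0)`) off the `max?` fold state. -/
def interpMax {β : Type} (m0 : Int) (b0 : β) (acc : Option (Int × β)) : Int × β :=
  match acc with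
  | none => (m0, b0)
  | some q => if m0 < q.1 then q else (m0, b0)

lemma foldMax_interp {β : Type} (m0 : Int) (b0 : β) :
    ∀ (ps : List (Int × β)) (acc : Option (Int × β)),
      ps.foldl (fun s x => if s.1 < x.1 then x else s) (interpMax m0 b0 acc)
        = interpMax m0 b0 (ps.foldl (fun a x =>
            match a with
            | none => some x
            | some m => if m.1 < x.1 then some x else some m) acc) := by
  intro ps
  induction ps with
  | nil => intro acc; rfl
  | cons x t ih =>
      intro acc
      have hstep :
          (fun (s : Int × β) x => if s.1 < x.1 then x else s) (interpMax m0 b0 acc) x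
            = interpMax m0 b0 ((fun a x =>
                match a with
                | none => some x
                | some m => if m.1 < x.1 then some x else some m) acc x) := by
        cases acc with
        | none => simp [interpMax]
        | some m =>
            simp only [interpMax]
            by_cases h1 : m0 < m.1
            · simp only [if_pos h1]
              by_cases h2 : m.1 < x.1
              · have hx : m0 < x.1 := lt_trans h1 h2
                simp [h2, hx]
              · simp [h2, h1]
            · simp only [if_neg h1]
              by_cases h2 : m.1 < x.1
              · simp [h2]
              · have hx : ¬ m0 < x.1 := by omega
                simp [h2, h1, hx]
      simpa [List.foldl_cons, hstep] using ih _

/-- Fuse A's rotation loop (inline filter + quantity computation) into a fold over the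
    filtered, mapped list used by B. -/
lemma calc_fold (ch cl cc : Int) :
    ∀ (rots : List (Int × Int × Int)) (s : Int × Option (Int × Int × Int)),
      rots.foldl (fun s rot =>
          if rot.1 ≤ 0 ∨ rot.2.1 ≤ 0 ∨ rot.2.2 ≤ 0 then s
          else
            let qtd := PySem.Int.floordiv ch rot.1 * PySem.Int.floordiv cl rot.2.1 *
                       PySem.Int.floordiv cc rot.2.2
            if s.1 < qtd then (qtd, some rot) else s) s
        = ((rots.filter (fun r => 0 < r.1 && 0 < r.2.1 && 0 < r.2.2)).map
            (fun r => (PySem.Int.floordiv ch r.1 * PySem.Int.floordiv cl r.2.1 *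
                       PySem.Int.floordiv cc r.2.2, some r))).foldl
            (fun s x => if s.1 < x.1 then x else s) s := by
  intro rots
  induction rots with
  | nil => intro s; rfl
  | cons r t ih =>
      intro s
      by_cases h : r.1 ≤ 0 ∨ r.2.1 ≤ 0 ∨ r.2.2 ≤ 0
      · have hf : (0 < r.1 && 0 < r.2.1 && 0 < r.2.2) = false := by
          rcases h with h | h | h <;> simp [decide_eq_true_eq] <;> omega
        simp [List.foldl_cons, hf, h, ih]
      · have ht : (0 < r.1 && 0 < r.2.1 && 0 < r.2.2) = true := by
          simp only [Bool.and_eq_true, decide_eq_true_eq]; omega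
        simp only [List.foldl_cons, List.filter_cons, ht, if_true, if_neg h, List.map_cons]
        exact ih _

/-- `interpMax 0 none` of the fold state is exactly Source B's `max(..., default=(0,None))`
    followed by the positivity threshold. -/
lemma maxD_read (acc : Option (Int × Option (Int × Int × Int))) :
    interpMax 0 none acc
      = (if 0 < (acc.getD ((0 : Int), (none : Option (Int × Int × Int)))).1
         then acc.getD (0, none) else (0, none)) := by
  cases acc with
  | none => simp [interpMax]
  | some q => simp [interpMax]

lemma max?_foldl {α : Type} (l : List (Int × α)) :
    l.foldl (fun a x =>
        match a with
        | none => some x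
        | some m => if m.1 < x.1 then some x else some m) none
      = PySem.List.max? l (fun t => t.1) := by
  simp only [PySem.List.max?]
  exact PySem.List.foldl_congr_mem _ _ _ _ (fun a x _ => by cases a <;> rfl)

lemma calc_eq (item : Int × Int × Int) (caixa : Int × Int × Int × Int × Int) :
    calcular_max_itens_alt item caixa = calcular_max_itens item caixa := by
  unfold calcular_max_itens calcular_max_itens_alt
  rw [calc_fold]
  have h0 : ((0 : Int), (none : Option (Int × Int × Int)))
      = interpMax 0 (none : Option (Int × Int × Int))
          (none : Option (Int × Option (Int × Int × Int))) := rfl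
  conv_rhs => rw [h0]
  rw [foldMax_interp, maxD_read, max?_foldl]
  simp only [PySem.List.maxD]

/-- The first-minimum-by-volume qualifying box: the canonical form both loops compute. -/
def minStep (item : Int × Int × Int) (quantidade : Int)
    (a : Option (Int × Int × Int × Int × Int)) (cx : Int × Int × Int × Int × Int) :
    Option (Int × Int × Int × Int × Int) :=
  if quantidade ≤ (calcular_max_itens item cx).1 then
    match a with
    | none => some cx
    | some m =>
        if cx.2.2.1 * cx.2.2.2.1 * cx.2.2.2.2 < m.2.2.1 * m.2.2.2.1 * m.2.2.2.2
        then some cx else some m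
  else a

/-- Reading A's four running best-so-far variables off the canonical fold state. -/
def interpA (item : Int × Int × Int)
    (a : Option (Int × Int × Int × Int × Int)) :
    Option (Int × Int × Int × Int × Int) × Int × Option (Int × Int × Int) × Option Int :=
  match a with
  | none => (none, 0, none, none)
  | some m => (some m, (calcular_max_itens item m).1, (calcular_max_itens item m).2,
               some (m.2.2.1 * m.2.2.2.1 * m.2.2.2.2))

lemma A_fold (item : Int × Int × Int) (quantidade : Int) :
    ∀ (caixas : List (Int × Int × Int × Int × Int))
      (a : Option (Int × Int × Int × Int × Int)),
      caixas.foldl (fun s caixa =>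
          let r := calcular_max_itens item caixa
          if quantidade ≤ r.1 then
            let vol := caixa.2.2.1 * caixa.2.2.2.1 * caixa.2.2.2.2
            match s.2.2.2 with
            | none => (some caixa, r.1, r.2, some vol)
            | some mv => if vol < mv then (some caixa, r.1, r.2, some vol) else s
          else s) (interpA item a)
        = interpA item (caixas.foldl (minStep item quantidade) a) := by
  intro caixas
  induction caixas with
  | nil => intro a; rfl
  | cons cx t ih =>
      intro a
      have hstep :
          (fun (s : Option (Int × Int × Int × Int × Int) × Int ×
                    Option (Int × Int × Int) × Option Int) caixa =>
            let r := calcular_max_itens item caixa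
            if quantidade ≤ r.1 then
              let vol := caixa.2.2.1 * caixa.2.2.2.1 * caixa.2.2.2.2
              match s.2.2.2 with
              | none => (some caixa, r.1, r.2, some vol)
              | some mv => if vol < mv then (some caixa, r.1, r.2, some vol) else s
            else s) (interpA item a) cx
            = interpA item (minStep item quantidade a cx) := by
        cases a with
        | none =>
            by_cases h : quantidade ≤ (calcular_max_itens item cx).1 <;>
              simp [interpA, minStep, h]
        | some m =>
            by_cases h : quantidade ≤ (calcular_max_itens item cx).1
            · by_cases hv : cx.2.2.1 * cx.2.2.2.1 * cx.2.2.2.2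
                  < m.2.2.1 * m.2.2.2.1 * m.2.2.2.2 <;>
                simp [interpA, minStep, h, hv]
            · simp [interpA, minStep, h]
      simpa [List.foldl_cons, hstep] using ih _

/-- Python's stable `insertBy` seen through `find?`: on a key-sorted list, inserting `x` and
    taking the first match is the first-minimum combination of `x` with the previous first match. -/
lemma find?_insertBy (p : (Int × Int × Int × Int × Int) → Bool)
    (key : (Int × Int × Int × Int × Int) → Int) (x : Int × Int × Int × Int × Int) :
    ∀ s : List (Int × Int × Int × Int × Int),
      s.Pairwise (fun a b => key a ≤ key b) →
      (PySem.List.insertBy (fun a b => decide (key a < key b)) x s).find? p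
        = if p x then
            (match s.find? p with
             | none => some x
             | some m => if key x < key m then some x else some m)
          else s.find? p := by
  intro s
  induction s with
  | nil =>
      intro _
      by_cases hx : p x <;> simp [PySem.List.insertBy, List.find?, hx]
  | cons y ys ih =>
      intro hp
      have hhead : ∀ m ∈ y :: ys, key y ≤ key m := by
        intro m hm
        rcases List.mem_cons.mp hm with rfl | hm
        · exact le_refl _
        · exact (List.pairwise_cons.mp hp).1 m hm
      by_cases hlt : key x < key y
      · have : PySem.List.insertBy (fun a b => decide (key a < key b)) x (y :: ys)
            = x :: y :: ys := by simp [PySem.List.insertBy, hlt]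
        rw [this]
        by_cases hx : p x
        · rw [List.find?_cons_of_pos hx, if_pos hx]
          cases hf : (y :: ys).find? p with
          | none => rfl
          | some m =>
              have hm : key x < key m :=
                lt_of_lt_of_le hlt (hhead m (List.mem_of_find?_eq_some hf))
              simp [hm]
        · rw [List.find?_cons_of_neg hx, if_neg (by simp [hx])]
      · have : PySem.List.insertBy (fun a b => decide (key a < key b)) x (y :: ys)
            = y :: PySem.List.insertBy (fun a b => decide (key a < key b)) x ys := by
          simp [PySem.List.insertBy, hlt]
        rw [this]
        by_cases hy : p y
        · have hns : ¬ key x < key y := hlt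
          rw [List.find?_cons_of_pos hy, List.find?_cons_of_pos hy]
          by_cases hx : p x <;> simp [hx, hns]
        · rw [List.find?_cons_of_neg hy, List.find?_cons_of_neg hy,
            ih (List.pairwise_cons.mp hp).2]

/-- `insertBy` keeps the list key-sorted. -/
lemma pairwise_insertBy (key : (Int × Int × Int × Int × Int) → Int)
    (x : Int × Int × Int × Int × Int) :
    ∀ s : List (Int × Int × Int × Int × Int),
      s.Pairwise (fun a b => key a ≤ key b) →
      (PySem.List.insertBy (fun a b => decide (key a < key b)) x s).Pairwise
        (fun a b => key a ≤ key b) := by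
  intro s
  induction s with
  | nil => intro _; simp [PySem.List.insertBy]
  | cons y ys ih =>
      intro hp
      obtain ⟨hy, hys⟩ := List.pairwise_cons.mp hp
      by_cases hlt : key x < key y
      · have : PySem.List.insertBy (fun a b => decide (key a < key b)) x (y :: ys)
            = x :: y :: ys := by simp [PySem.List.insertBy, hlt]
        rw [this]
        refine List.pairwise_cons.mpr ⟨?_, hp⟩
        intro m hm
        rcases List.mem_cons.mp hm with rfl | hm
        · exact le_of_lt hlt
        · exact le_trans (le_of_lt hlt) (hy m hm)
      · have : PySem.List.insertBy (fun a b => decide (key a < key b)) x (y :: ys)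
            = y :: PySem.List.insertBy (fun a b => decide (key a < key b)) x ys := by
          simp [PySem.List.insertBy, hlt]
        rw [this]
        refine List.pairwise_cons.mpr ⟨?_, ih hys⟩
        intro m hm
        rcases (PySem.List.mem_insertBy _ _ _ _).mp hm with rfl | hm
        · omega
        · exact hy m hm

/-- Building the sorted list by repeated insertion and then taking the first match
    computes the canonical first-minimum fold. -/
lemma find?_sort_fold (item : Int × Int × Int) (quantidade : Int)
    (key : (Int × Int × Int × Int × Int) → Int)
    (hkey : ∀ cx, key cx = cx.2.2.1 * cx.2.2.2.1 * cx.2.2.2.2) :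
    ∀ (caixas : List (Int × Int × Int × Int × Int))
      (s : List (Int × Int × Int × Int × Int)),
      s.Pairwise (fun a b => key a ≤ key b) →
      (caixas.foldl (fun acc cx =>
          PySem.List.insertBy (fun a b => decide (key a < key b)) cx acc) s).find?
          (fun cx => decide (quantidade ≤ (calcular_max_itens item cx).1))
        = caixas.foldl (minStep item quantidade)
            (s.find? (fun cx => decide (quantidade ≤ (calcular_max_itens item cx).1))) := by
  intro caixas
  induction caixas with
  | nil => intro s _; rfl
  | cons cx t ih =>
      intro s hs
      rw [List.foldl_cons, List.foldl_cons,
        ih _ (pairwise_insertBy key cx s hs),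
        find?_insertBy _ key cx s hs]
      congr 1
      by_cases h : quantidade ≤ (calcular_max_itens item cx).1
      · cases hf : s.find? (fun cx => decide (quantidade ≤ (calcular_max_itens item cx).1)) with
        | none => simp [minStep, h]
        | some m => simp [minStep, h, hkey]
      · simp [minStep, h]

/-- Source B's loop over any list is `find?` plus the per-box recomputation. -/
lemma emc_loop_find (item : Int × Int × Int) (quantidade : Int) :
    ∀ s : List (Int × Int × Int × Int × Int),
      emc_loop item quantidade s
        = match s.find? (fun cx => decide (quantidade ≤ (calcular_max_itens item cx).1)) with
          | none => (none, 0, none)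
          | some m => (some m, (calcular_max_itens item m).1, (calcular_max_itens item m).2) := by
  intro s
  induction s with
  | nil => rfl
  | cons cx t ih =>
      by_cases h : quantidade ≤ (calcular_max_itens item cx).1
      · simp [emc_loop, calc_eq, List.find?, h]
      · simp [emc_loop, calc_eq, List.find?, h, ih]

-- ===== VERDICT (by name: the statement is the Claim_ definition above) =====
theorem encontrar_melhor_caixa_spec : Claim_equal_encontrar_melhor_caixa := by
  intro item q caixas _
  unfold Spec_encontrar_melhor_caixa encontrar_melhor_caixa encontrar_melhor_caixa_alt
  rw [emc_loop_find, PySem.List.sorted_eq_foldl_insertBy,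
    find?_sort_fold item q _ (fun cx => rfl) caixas [] (by simp)]
  have h0 : ((none, 0, none, none) :
      Option (Int × Int × Int × Int × Int) × Int × Option (Int × Int × Int) × Option Int)
      = interpA item none := rfl
  rw [h0, A_fold]
  simp only [List.find?_nil]
  cases caixas.foldl (minStep item q) none with
  | none => rfl
  | some m => rfl
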